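-- pv_equiv track=rewrite | github.com/ovasoft/proverb | source/home/models.py | abr
-- ===== SOURCE A (Python) =====
-- def abr(vals):
-- 	res = []
-- 	for val in vals:
-- 		if val in ['finance','financial security']:
-- 			res.append('finance')
-- 		if val in ['physiological','health']:
-- 			res.append('nutrition')
-- 		if val == 'psychological':
-- 			res.append('emotion')
-- 		if val in ['community','work','safety','family','spiritual']:
-- 			res.append(val)
-- 	return res
-- ===== SOURCE B (Python) =====
-- _RULES = [
--     (('finance', 'financial security'), 'finance'),
--     (('physiological', 'health'), 'nutrition'),
--     (('psychological',), 'emotion'),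
--     (('community', 'work', 'safety', 'family', 'spiritual'), None),  # None = keep the value itself
-- ]
--
-- def abr(vals):
--     # staged passes: one scan per category records positions, then emit in index order
--     labels = {}
--     for keys, lab in _RULES:
--         for i, v in enumerate(vals):
--             if v in keys:
--                 labels[i] = v if lab is None else lab
--     return [labels[i] for i in range(len(vals)) if i in labels]
-- ===== Notes on version B (the rewrite author's own statement) =====
-- stated objective: alternative
-- what changed: Instead of one pass with four sequential branches appending to the result, B makes one scan per category over the whole list recording index->label in a position table, then a final index sweep emits the labels in input order; correctness relies on the categories being disjoint.
import Mathlib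
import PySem

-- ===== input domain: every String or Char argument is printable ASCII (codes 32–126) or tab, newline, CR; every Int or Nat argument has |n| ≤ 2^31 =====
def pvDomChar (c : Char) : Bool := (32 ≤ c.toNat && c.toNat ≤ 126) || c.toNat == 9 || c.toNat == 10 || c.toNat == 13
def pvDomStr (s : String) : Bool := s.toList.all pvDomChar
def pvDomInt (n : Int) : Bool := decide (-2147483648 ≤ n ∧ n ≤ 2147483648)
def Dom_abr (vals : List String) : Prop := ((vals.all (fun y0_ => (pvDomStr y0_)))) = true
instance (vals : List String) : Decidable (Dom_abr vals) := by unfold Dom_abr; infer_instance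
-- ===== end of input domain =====

-- B replaces A's single pass with four branches by one scan per category that records
-- index -> label in a position table, followed by an index sweep emitting labels in input order.


-- ===== PORT A =====
def abr (vals : List String) : List String :=
  vals.foldl (fun res val =>
    let res := if val = "finance" ∨ val = "financial security" then res ++ ["finance"] else res
    let res := if val = "physiological" ∨ val = "health" then res ++ ["nutrition"] else res
    let res := if val = "psychological" then res ++ ["emotion"] else res
    let res := if val = "community" ∨ val = "work" ∨ val = "safety" ∨ val = "family" ∨ val = "spiritual"
               then res ++ [val] else res
    res) []

-- ===== PORT B =====
def abrRules : List (List String × Option String) :=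
  [(["finance", "financial security"], some "finance"),
   (["physiological", "health"], some "nutrition"),
   (["psychological"], some "emotion"),
   (["community", "work", "safety", "family", "spiritual"], none)]

def abr_alt (vals : List String) : List String :=
  let labels : PySem.Dict Int String := abrRules.foldl (fun d rule =>
      (PySem.List.enumerate vals).foldl
        (fun d p => if p.2 ∈ rule.1 then d.insert p.1 (rule.2.getD p.2) else d) d)
    PySem.Dict.empty
  (PySem.List.pyRange 0 (PySem.List.len vals) 1).filterMap (fun i => labels.get? i)

-- ===== PRECONDITION & SPEC =====
def Spec_abr (vals : List String) (out : List String) : Prop := out = abr_alt vals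
instance (vals : List String) (out : List String) : Decidable (Spec_abr vals out) := by unfold Spec_abr; infer_instance

-- ===== CLAIM (what is proved, stated in full; the proofs are below) =====
def Claim_equal_abr : Prop := ∀ (vals : List String), Dom_abr vals → Spec_abr vals (abr vals)

-- ===== LEMMAS AND PROOFS =====

-- the one-value label function both programs realise (rule order of B's passes; the rules are disjoint)
def optLabel (v : String) : Option String :=
  if v ∈ ["community", "work", "safety", "family", "spiritual"] then some v
  else if v ∈ ["psychological"] then some "emotion"
  else if v ∈ ["physiological", "health"] then some "nutrition"
  else if v ∈ ["finance", "financial security"] then some "finance"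
  else none

-- ---- A side: the loop body appends exactly (optLabel v).toList ----
theorem abr_step (acc : List String) (v : String) :
    (let r1 := if v = "finance" ∨ v = "financial security" then acc ++ ["finance"] else acc
     let r2 := if v = "physiological" ∨ v = "health" then r1 ++ ["nutrition"] else r1
     let r3 := if v = "psychological" then r2 ++ ["emotion"] else r2
     let r4 := if v = "community" ∨ v = "work" ∨ v = "safety" ∨ v = "family" ∨ v = "spiritual"
               then r3 ++ [v] else r3
     r4) = acc ++ (optLabel v).toList := by
  simp only []
  by_cases h1 : v = "finance"
  · subst h1; simp [optLabel]
  by_cases h2 : v = "financial security"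
  · subst h2; simp [optLabel]
  by_cases h3 : v = "physiological"
  · subst h3; simp [optLabel]
  by_cases h4 : v = "health"
  · subst h4; simp [optLabel]
  by_cases h5 : v = "psychological"
  · subst h5; simp [optLabel]
  by_cases h6 : v = "community"
  · subst h6; simp [optLabel]
  by_cases h7 : v = "work"
  · subst h7; simp [optLabel]
  by_cases h8 : v = "safety"
  · subst h8; simp [optLabel]
  by_cases h9 : v = "family"
  · subst h9; simp [optLabel]
  by_cases h10 : v = "spiritual"
  · subst h10; simp [optLabel]
  simp [optLabel, h1, h2, h3, h4, h5, h6, h7, h8, h9, h10]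

theorem abr_foldl (vals : List String) (acc : List String) :
    vals.foldl (fun res val =>
      let res := if val = "finance" ∨ val = "financial security" then res ++ ["finance"] else res
      let res := if val = "physiological" ∨ val = "health" then res ++ ["nutrition"] else res
      let res := if val = "psychological" then res ++ ["emotion"] else res
      let res := if val = "community" ∨ val = "work" ∨ val = "safety" ∨ val = "family" ∨ val = "spiritual"
                 then res ++ [val] else res
      res) acc = acc ++ vals.filterMap optLabel := by
  induction vals generalizing acc with
  | nil => simp
  | cons v vs ih =>
    rw [List.foldl_cons, ih, abr_step]
    cases h : optLabel v <;> simp [h]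

theorem abr_eq_filterMap (vals : List String) : abr vals = vals.filterMap optLabel := by
  unfold abr; rw [abr_foldl]; simp

-- ---- B side: generic facts about an insert-if pass over a list of keyed pairs ----
theorem foldl_insert_get?_of_not_mem (C : Int × String → Prop) [DecidablePred C]
    (f : Int × String → String) (l : List (Int × String)) (d : PySem.Dict Int String) (i : Int)
    (h : ∀ p ∈ l, p.1 ≠ i) :
    (l.foldl (fun d p => if C p then d.insert p.1 (f p) else d) d).get? i = d.get? i := by
  induction l generalizing d with
  | nil => rfl
  | cons p t ih =>
    rw [List.foldl_cons, ih _ (fun q hq => h q (List.mem_cons_of_mem _ hq))]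
    split
    · exact PySem.Dict.get?_insert_of_ne _ _ (Ne.symm (h p (List.mem_cons_self)))
    · rfl

theorem foldl_insert_get?_of_mem (C : Int × String → Prop) [DecidablePred C]
    (f : Int × String → String) (l : List (Int × String)) (d : PySem.Dict Int String)
    (i : Int) (v : String) (hmem : (i, v) ∈ l) (hpw : l.Pairwise (fun p q => p.1 ≠ q.1)) :
    (l.foldl (fun d p => if C p then d.insert p.1 (f p) else d) d).get? i =
      if C (i, v) then some (f (i, v)) else d.get? i := by
  induction l generalizing d with
  | nil => cases hmem
  | cons p t ih =>
    rw [List.pairwise_cons] at hpw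
    rw [List.foldl_cons]
    rcases List.mem_cons.mp hmem with hp | ht
    · subst hp
      have hfst : ∀ q ∈ t, q.1 ≠ i := fun q hq => (hpw.1 q hq).symm
      rw [foldl_insert_get?_of_not_mem C f t _ i hfst]
      split
      · exact PySem.Dict.get?_insert_self _ _ _
      · rfl
    · have hne : i ≠ p.1 := fun h => (hpw.1 (i, v) ht) (by simp [h])
      rw [ih _ ht hpw.2]
      split
      · rfl
      · split
        · exact PySem.Dict.get?_insert_of_ne _ _ hne
        · rfl

theorem mem_enum (vals : List String) (k : Nat) (hk : k < vals.length) :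
    ((k : Int), vals[k]) ∈ PySem.List.enumerate vals 0 := by
  rw [PySem.List.mem_enumerate_iff]
  exact ⟨k, hk, by simp⟩

theorem pw_enum (vals : List String) :
    (PySem.List.enumerate vals 0).Pairwise (fun p q => p.1 ≠ q.1) :=
  (PySem.List.pairwise_lt_enumerate vals 0).imp (fun h => ne_of_lt h)

-- the position table built by B's four passes holds exactly optLabel at every valid index
theorem labels_get (vals : List String) (k : Nat) (hk : k < vals.length) :
    (abrRules.foldl (fun d rule =>
        (PySem.List.enumerate vals).foldl
          (fun d p => if p.2 ∈ rule.1 then d.insert p.1 (rule.2.getD p.2) else d) d)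
      PySem.Dict.empty).get? (k : Int) = optLabel vals[k] := by
  simp only [abrRules, List.foldl_cons, List.foldl_nil]
  rw [foldl_insert_get?_of_mem (fun p => p.2 ∈ ["community", "work", "safety", "family", "spiritual"])
        _ _ _ _ _ (mem_enum vals k hk) (pw_enum vals),
      foldl_insert_get?_of_mem (fun p => p.2 ∈ ["psychological"])
        _ _ _ _ _ (mem_enum vals k hk) (pw_enum vals),
      foldl_insert_get?_of_mem (fun p => p.2 ∈ ["physiological", "health"])
        _ _ _ _ _ (mem_enum vals k hk) (pw_enum vals),
      foldl_insert_get?_of_mem (fun p => p.2 ∈ ["finance", "financial security"])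
        _ _ _ _ _ (mem_enum vals k hk) (pw_enum vals)]
  simp [optLabel, PySem.Dict.get?_empty]

theorem filterMap_range_bind (vals : List String) (n : Nat) :
    (List.range n).filterMap (fun k => (vals[k]?).bind optLabel)
      = (vals.take n).filterMap optLabel := by
  induction n with
  | zero => simp
  | succ n ih =>
    rw [List.range_succ, List.filterMap_append, ih, List.take_add_one, List.filterMap_append]
    cases h : vals[n]? <;> simp [List.filterMap_cons, h]

-- the B port evaluates to the same filterMap
theorem abr_alt_eq (vals : List String) : abr_alt vals = vals.filterMap optLabel := by
  unfold abr_alt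
  simp only []
  have hlen : PySem.List.len vals = (vals.length : Int) := by simp
  rw [hlen, PySem.List.pyRange_zero_natCast, List.filterMap_map]
  refine Eq.trans (List.filterMap_congr (g := fun k => (vals[k]?).bind optLabel) ?_) ?_
  · intro k hk
    have hk' := List.mem_range.mp hk
    simp only [Function.comp_apply]
    rw [labels_get vals k hk', List.getElem?_eq_getElem hk']
    rfl
  · rw [filterMap_range_bind, List.take_length]

-- ===== VERDICT (by name: the statement is the Claim_ definition above) =====
theorem abr_spec : Claim_equal_abr := by
  intro vals _
  unfold Spec_abr
  rw [abr_eq_filterMap, abr_alt_eq]
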